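-- pv_equiv track=rewrite | github.com/pypi-data/pypi-mirror-380 | packages/cursus/cursus-1.3.5-py3-none-any.whl/cursus/workspace/validation/workspace_test_manager.py | _generate_isolation_recommendations
-- ===== SOURCE A (Python) =====
-- from typing import Optional, List, Dict, Any, Union, Tuple
--
-- def _generate_isolation_recommendations(violations: List[str]) -> List[str]:
--     """Generate recommendations for isolation violations."""
--     recommendations = []
--
--     if not violations:
--         recommendations.append("Test isolation is properly configured")
--         return recommendations
--
--     # Generate specific recommendations based on violations
--     for violation in violations:
--         if "boundary" in violation.lower():
--             recommendations.append("Review workspace boundary configuration")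
--         elif "access" in violation.lower():
--             recommendations.append("Check access control settings")
--         elif "resource" in violation.lower():
--             recommendations.append("Verify resource isolation limits")
--         else:
--             recommendations.append(f"Address isolation issue: {violation}")
--
--     return recommendations
-- ===== SOURCE B (Python) =====
-- _ISOLATION_TABLE = [
--     ("boundary", "Review workspace boundary configuration"),
--     ("access", "Check access control settings"),
--     ("resource", "Verify resource isolation limits"),
-- ]
--
-- def _generate_isolation_recommendations(violations):
--     if not violations:
--         return ["Test isolation is properly configured"]
--     # staged passes, keyword-outermost: each keyword pass claims the still-empty
--     # slots of violations containing it; earlier passes win, so priority is kept.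
--     slots = [None] * len(violations)
--     for kw, rec in _ISOLATION_TABLE:
--         slots = [rec if s is None and kw in v.lower() else s
--                  for s, v in zip(slots, violations)]
--     return [s if s is not None else f"Address isolation issue: {v}"
--             for s, v in zip(slots, violations)]
-- ===== Notes on version B (the rewrite author's own statement) =====
-- stated objective: alternative
-- what changed: Inverts the loop nesting: instead of A's per-violation if/elif chain, B iterates over the keyword table outermost in staged passes that claim still-empty slots of a parallel array (earlier keyword passes win, preserving priority), then a final pass fills unclaimed slots with the default message.
import Mathlib
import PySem

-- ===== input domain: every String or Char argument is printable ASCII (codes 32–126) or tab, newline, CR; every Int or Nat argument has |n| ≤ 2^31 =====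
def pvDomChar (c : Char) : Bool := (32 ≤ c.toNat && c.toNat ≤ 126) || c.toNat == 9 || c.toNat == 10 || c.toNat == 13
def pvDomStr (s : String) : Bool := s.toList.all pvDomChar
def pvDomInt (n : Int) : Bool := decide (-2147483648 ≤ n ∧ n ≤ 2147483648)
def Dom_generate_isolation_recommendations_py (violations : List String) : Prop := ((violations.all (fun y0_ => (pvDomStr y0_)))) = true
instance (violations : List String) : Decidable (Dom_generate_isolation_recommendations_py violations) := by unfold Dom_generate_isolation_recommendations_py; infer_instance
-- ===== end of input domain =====

-- B inverts the loop nesting: keyword-outermost staged passes over a parallel slot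
-- array instead of A's per-violation if/elif chain (alternative; same cost, not faster).

-- ===== PORT A =====
def generate_isolation_recommendations_py (violations : List String) : List String :=
  if violations.isEmpty then
    [] ++ ["Test isolation is properly configured"]
  else
    violations.foldl (fun recommendations violation =>
      if PySem.Str.isIn "boundary" (PySem.Str.lower violation) then
        recommendations ++ ["Review workspace boundary configuration"]
      else if PySem.Str.isIn "access" (PySem.Str.lower violation) then
        recommendations ++ ["Check access control settings"]
      else if PySem.Str.isIn "resource" (PySem.Str.lower violation) then
        recommendations ++ ["Verify resource isolation limits"]
      else
        recommendations ++ ["Address isolation issue: " ++ violation]) []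

-- ===== PORT B =====
-- ordered keyword table; each pass claims still-empty slots, so earlier keywords win
def isolationTable : List (String × String) :=
  [("boundary", "Review workspace boundary configuration"),
   ("access", "Check access control settings"),
   ("resource", "Verify resource isolation limits")]

def generate_isolation_recommendations_py_alt (violations : List String) : List String :=
  if violations.isEmpty then
    ["Test isolation is properly configured"]
  else
    let slots0 : List (Option String) := violations.map (fun _ => (none : Option String))
    let slots := isolationTable.foldl (fun slots kr =>
      (slots.zip violations).map (fun sv =>
        if sv.1 == none && PySem.Str.isIn kr.1 (PySem.Str.lower sv.2) then some kr.2
        else sv.1)) slots0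
    (slots.zip violations).map (fun sv =>
      match sv.1 with
      | some s => s
      | none => "Address isolation issue: " ++ sv.2)

-- ===== PRECONDITION & SPEC =====
def Spec_generate_isolation_recommendations_py (violations : List String) (out : List String) : Prop := out = generate_isolation_recommendations_py_alt violations
instance (violations : List String) (out : List String) : Decidable (Spec_generate_isolation_recommendations_py violations out) := by unfold Spec_generate_isolation_recommendations_py; infer_instance

-- ===== CLAIM (what is proved, stated in full; the proofs are below) =====
def Claim_equal_generate_isolation_recommendations_py : Prop := ∀ (violations : List String), Dom_generate_isolation_recommendations_py violations → Spec_generate_isolation_recommendations_py violations (generate_isolation_recommendations_py violations)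

-- ===== LEMMAS AND PROOFS =====

-- per-element value of A's if/elif chain
def chainF (violation : String) : String :=
  if PySem.Str.isIn "boundary" (PySem.Str.lower violation) then
    "Review workspace boundary configuration"
  else if PySem.Str.isIn "access" (PySem.Str.lower violation) then
    "Check access control settings"
  else if PySem.Str.isIn "resource" (PySem.Str.lower violation) then
    "Verify resource isolation limits"
  else "Address isolation issue: " ++ violation

-- B's staged-pass pipeline (without the empty-list branch), named for the proofs
def altBody (vs : List String) : List String :=
  ((isolationTable.foldl (fun slots kr =>
      (slots.zip vs).map (fun sv =>
        if sv.1 == none && PySem.Str.isIn kr.1 (PySem.Str.lower sv.2) then some kr.2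
        else sv.1)) (vs.map (fun _ => (none : Option String)))).zip vs).map (fun sv =>
    match sv.1 with
    | some s => s
    | none => "Address isolation issue: " ++ sv.2)

lemma altBody_eq_map (vs : List String) : altBody vs = vs.map chainF := by
  induction vs with
  | nil => rfl
  | cons v vs ih =>
    have step : altBody (v :: vs) = chainF v :: altBody vs := by
      simp only [altBody, isolationTable, List.foldl, List.map_cons, List.zip_cons_cons,
        chainF]
      split_ifs <;> simp_all
    rw [step, ih, List.map_cons]

theorem generate_isolation_recommendations_py_spec : Claim_equal_generate_isolation_recommendations_py := by
  intro violations _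
  unfold Spec_generate_isolation_recommendations_py
  unfold generate_isolation_recommendations_py generate_isolation_recommendations_py_alt
  by_cases h : violations.isEmpty
  · simp [h]
  simp only [h, Bool.false_eq_true, if_false]
  have hA : violations.foldl (fun recommendations violation =>
      if PySem.Str.isIn "boundary" (PySem.Str.lower violation) then
        recommendations ++ ["Review workspace boundary configuration"]
      else if PySem.Str.isIn "access" (PySem.Str.lower violation) then
        recommendations ++ ["Check access control settings"]
      else if PySem.Str.isIn "resource" (PySem.Str.lower violation) then
        recommendations ++ ["Verify resource isolation limits"]
      else
        recommendations ++ ["Address isolation issue: " ++ violation]) []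
      = violations.map chainF := by
    rw [show (fun recommendations violation =>
        if PySem.Str.isIn "boundary" (PySem.Str.lower violation) then
          recommendations ++ ["Review workspace boundary configuration"]
        else if PySem.Str.isIn "access" (PySem.Str.lower violation) then
          recommendations ++ ["Check access control settings"]
        else if PySem.Str.isIn "resource" (PySem.Str.lower violation) then
          recommendations ++ ["Verify resource isolation limits"]
        else
          recommendations ++ ["Address isolation issue: " ++ violation])
      = (fun (acc : List String) v => acc ++ [chainF v]) from by
        funext acc v; simp only [chainF]; split_ifs <;> rfl]
    rw [PySem.List.foldl_append_singleton_eq_map]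
    simp
  rw [hA, ← altBody_eq_map]
  rfl
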